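-- pv_equiv track=rewrite | github.com/YIWANG3/framebase | services/sidecar/src/media_workspace/cli.py | _infer_origin_stem
-- ===== SOURCE A (Python) =====
-- def _infer_origin_stem(stem: str) -> tuple[str | None, str]:
--     inferred_kind = "import"
--     current = stem
--     changed = False
--     while True:
--         next_value = current
--         if "_ai-repaint" in current:
--             next_value = current.split("_ai-repaint", 1)[0]
--             inferred_kind = "ai_repaint"
--         elif "_edited" in current:
--             next_value = current.split("_edited", 1)[0]
--             if inferred_kind == "import":
--                 inferred_kind = "crop"
--         elif "_crop" in current:
--             next_value = current.split("_crop", 1)[0]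
--             if inferred_kind == "import":
--                 inferred_kind = "crop"
--         if next_value == current:
--             break
--         current = next_value
--         changed = True
--     return (current if changed and current else None, inferred_kind)
-- ===== SOURCE B (Python) =====
-- def _infer_origin_stem(stem: str) -> tuple[str | None, str]:
--     ia = stem.find("_ai-repaint")
--     ie = stem.find("_edited")
--     ic = stem.find("_crop")
--     cuts = [i for i in (ia, ie, ic) if i >= 0]
--     if not cuts:
--         return (None, "import")
--     kind = "ai_repaint" if ia >= 0 else "crop"
--     prefix = stem[:min(cuts)]
--     return (prefix or None, kind)
-- ===== Notes on version B (the rewrite author's own statement) =====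
-- stated objective: simpler
-- what changed: Replaces the repeated split-until-fixpoint while loop with a single pass of three str.find calls: cut at the leftmost marker occurrence and read the kind off which markers are present.
import Mathlib
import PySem

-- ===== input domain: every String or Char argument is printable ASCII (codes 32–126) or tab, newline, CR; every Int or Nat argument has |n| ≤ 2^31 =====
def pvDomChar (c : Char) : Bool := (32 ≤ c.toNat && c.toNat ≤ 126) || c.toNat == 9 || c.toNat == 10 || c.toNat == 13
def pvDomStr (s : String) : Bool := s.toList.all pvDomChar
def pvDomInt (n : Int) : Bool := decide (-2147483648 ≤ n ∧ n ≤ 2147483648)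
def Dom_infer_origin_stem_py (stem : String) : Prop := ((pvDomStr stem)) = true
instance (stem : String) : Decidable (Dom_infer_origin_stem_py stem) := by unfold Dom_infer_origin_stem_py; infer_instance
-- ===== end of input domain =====

-- B replaces A's split-until-fixpoint while loop by a single pass of three str.find calls
-- (cut at the leftmost marker, kind from which markers are present): simpler, no loop.

-- ===== PORT A =====
-- the three marker literals
def pvM1 : List Char := "_ai-repaint".toList
def pvM2 : List Char := "_edited".toList
def pvM3 : List Char := "_crop".toList

-- `s.split(sep, 1)[0]` (sep is one of the nonempty literals above, so the defaults never fire)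
def pySplit1Head (s sep : List Char) : List Char :=
  ((PySem.Chars.splitMax? s sep 1).getD []).headD []

-- termination helpers for loopA_py (cited by its decreasing_by): the head of split(sep,1) is a prefix
lemma pvGo0_eq (sep : List Char) (fuel : Nat) (l : List Char) (acc : List (List Char)) :
    PySem.Chars.splitOnMax.go sep fuel 0 l [] acc = (l :: acc).reverse := by
  cases fuel with
  | zero => simp [PySem.Chars.splitOnMax.go]
  | succ f => cases l <;> simp [PySem.Chars.splitOnMax.go]

lemma pvFindGo_shift (sub l : List Char) : ∀ k : Nat,
    PySem.Chars.find.go sub l k =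
      if PySem.Chars.find.go sub l 0 < 0 then -1 else PySem.Chars.find.go sub l 0 + k := by
  induction l with
  | nil =>
      intro k
      by_cases h : sub.isEmpty <;> simp [PySem.Chars.find.go, h]
  | cons c t ih =>
      intro k
      by_cases h : sub.isPrefixOf (c :: t)
      · simp [PySem.Chars.find.go, h]
      · simp only [PySem.Chars.find.go, h, if_false]
        rw [ih (k+1), ih 1]
        by_cases h0 : PySem.Chars.find.go sub t 0 < 0
        · simp [h0]
        · simp only [h0, if_false]
          push_cast
          split <;> omega

lemma pvFind_cons (sub : List Char) (c : Char) (t : List Char) :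
    PySem.Chars.find (c :: t) sub =
      if sub.isPrefixOf (c :: t) then 0
      else if PySem.Chars.find t sub < 0 then -1 else PySem.Chars.find t sub + 1 := by
  show PySem.Chars.find.go sub (c :: t) 0 = _
  by_cases h : sub.isPrefixOf (c :: t)
  · simp [PySem.Chars.find.go, h]
  · simp only [PySem.Chars.find.go, h, if_false]
    rw [pvFindGo_shift sub t 1]
    rfl

lemma pvFind_nil (sub : List Char) (h : sub ≠ []) : PySem.Chars.find [] sub = -1 := by
  have : sub.isEmpty = false := by simpa [List.isEmpty_iff] using h
  simp [PySem.Chars.find, PySem.Chars.find.go, this]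

lemma pvGo1_head (sep : List Char) (hsep : sep ≠ []) :
    ∀ (fuel : Nat) (l cur : List Char), l.length < fuel →
      (PySem.Chars.splitOnMax.go sep fuel 1 l cur []).head?.getD []
        = cur.reverse ++
            (if 0 ≤ PySem.Chars.find l sep then l.take (PySem.Chars.find l sep).toNat else l) := by
  intro fuel
  induction fuel with
  | zero => intro l cur h; omega
  | succ f ih =>
      intro l cur h
      cases l with
      | nil =>
          simp [PySem.Chars.splitOnMax.go, pvFind_nil sep hsep]
      | cons c t =>
          by_cases hp : sep.isPrefixOf (c :: t)
          · simp only [PySem.Chars.splitOnMax.go, hp, if_true]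
            rw [pvGo0_eq]
            simp [pvFind_cons, hp]
          · rw [show PySem.Chars.splitOnMax.go sep (f+1) 1 (c :: t) cur []
                  = PySem.Chars.splitOnMax.go sep f 1 t (c :: cur) [] from by
                simp [PySem.Chars.splitOnMax.go, hp]]
            rw [ih t (c :: cur) (by simpa using Nat.lt_of_succ_lt_succ h)]
            rw [pvFind_cons sep c t]
            simp only [hp, Bool.false_eq_true, if_false]
            by_cases h0 : PySem.Chars.find t sep < 0
            · simp [h0, not_le.mpr h0]
            · push_neg at h0
              have h1 : (0:Int) ≤ PySem.Chars.find t sep + 1 := by omega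
              have h3 : (PySem.Chars.find t sep + 1).toNat = (PySem.Chars.find t sep).toNat + 1 := by omega
              simp [h0, h1, h3, not_lt.mpr h0]

lemma pySplit1Head_eq (s sep : List Char) (hsep : sep ≠ []) :
    pySplit1Head s sep =
      if 0 ≤ PySem.Chars.find s sep then s.take (PySem.Chars.find s sep).toNat else s := by
  have he : sep.isEmpty = false := by simpa [List.isEmpty_iff] using hsep
  unfold pySplit1Head
  rw [PySem.Chars.splitMax?]
  simp only [he, Bool.false_eq_true, if_false, Option.getD_some]
  rw [PySem.Chars.splitOnMax]
  rw [if_neg (by omega)]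
  simp only [Int.toNat_one, List.headD_eq_head?_getD]
  rw [pvGo1_head sep hsep (s.length + 1) s [] (by omega)]
  simp

lemma pySplit1Head_prefix (s sep : List Char) (hsep : sep ≠ []) : pySplit1Head s sep <+: s := by
  rw [pySplit1Head_eq s sep hsep]
  split
  · exact List.take_prefix _ _
  · exact List.prefix_refl _

lemma pvPrefix_ne_lt {l₁ l₂ : List Char} (h : l₁ <+: l₂) (hne : l₁ ≠ l₂) :
    l₁.length < l₂.length :=
  lt_of_le_of_ne h.length_le (fun he => hne (h.eq_of_length_le he.ge))

-- the `while True:` loop of A, on the code points; state = (current, inferred_kind, changed)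
def loopA_py (current : List Char) (kind : String) (changed : Bool) : Option String × String :=
  let step : List Char × String :=
    if PySem.Chars.isIn pvM1 current then
      (pySplit1Head current pvM1, "ai_repaint")
    else if PySem.Chars.isIn pvM2 current then
      (pySplit1Head current pvM2, if kind = "import" then "crop" else kind)
    else if PySem.Chars.isIn pvM3 current then
      (pySplit1Head current pvM3, if kind = "import" then "crop" else kind)
    else (current, kind)
  if h : step.1 = current then
    ((if changed = true ∧ current ≠ [] then some (String.ofList current) else none), step.2)
  else loopA_py step.1 step.2 true
termination_by current.length
decreasing_by
  have hp : step.1 <+: current := by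
    simp only [step]
    split_ifs <;>
      first
        | exact pySplit1Head_prefix _ _ (by decide)
        | exact List.prefix_refl _
  exact pvPrefix_ne_lt hp h

def infer_origin_stem_py (stem : String) : Option String × String :=
  loopA_py stem.toList "import" false

-- ===== PORT B =====
def infer_origin_stem_py_alt (stem : String) : Option String × String :=
  let ia := PySem.Str.find stem "_ai-repaint"
  let ie := PySem.Str.find stem "_edited"
  let ic := PySem.Str.find stem "_crop"
  let cuts := ([ia, ie, ic]).filter (fun i => decide (0 ≤ i))
  match PySem.List.min? cuts (fun x => x) with
  | none => (none, "import")
  | some c =>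
      let kind := if 0 ≤ ia then "ai_repaint" else "crop"
      let pre := PySem.Str.slice stem none (some c)
      ((if pre = "" then none else some pre), kind)

-- ===== PRECONDITION & SPEC =====
def Spec_infer_origin_stem_py (stem : String) (out : Option String × String) : Prop := out = infer_origin_stem_py_alt stem
instance (stem : String) (out : Option String × String) : Decidable (Spec_infer_origin_stem_py stem out) := by unfold Spec_infer_origin_stem_py; infer_instance

-- ===== CLAIM (what is proved, stated in full; the proofs are below) =====
def Claim_equal_infer_origin_stem_py : Prop := ∀ (stem : String), Dom_infer_origin_stem_py stem → Spec_infer_origin_stem_py stem (infer_origin_stem_py stem)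

-- ===== LEMMAS AND PROOFS =====

-- B's cut candidates, on the list side
def pvCuts (s : List Char) : List Int :=
  ([PySem.Chars.find s pvM1, PySem.Chars.find s pvM2, PySem.Chars.find s pvM3]).filter
    (fun i => decide (0 ≤ i))

-- the value component of A's loop result
def pvVal (s : List Char) (changed : Bool) : Option String :=
  match PySem.List.min? (pvCuts s) (fun x => x) with
  | none => if changed = true ∧ s ≠ [] then some (String.ofList s) else none
  | some c => if s.take c.toNat ≠ [] then some (String.ofList (s.take c.toNat)) else none

-- the kind component of A's loop result
def pvKind (s : List Char) (kind : String) : String :=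
  if PySem.Chars.isIn pvM1 s then "ai_repaint"
  else if PySem.Chars.isIn pvM2 s || PySem.Chars.isIn pvM3 s then
    (if kind = "import" then "crop" else kind)
  else kind

lemma pvOcc_of_prefix {t s m : List Char} (hts : t <+: s) {j : Nat}
    (h : m <+: t.drop j) : m <+: s.drop j := by
  obtain ⟨r, rfl⟩ := hts
  rw [List.drop_append]
  exact h.trans (List.prefix_append _ _)

lemma pvOcc_take {s m : List Char} {j i : Nat} (h : m <+: s.drop j)
    (hle : j + m.length ≤ i) : m <+: (s.take i).drop j := by
  rw [List.drop_take, List.prefix_take_iff]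
  exact ⟨h, by omega⟩

lemma pvIsIn_of_occ {s m : List Char} {j : Nat} (h : m <+: s.drop j) :
    PySem.Chars.isIn m s = true :=
  (PySem.Chars.exists_prefix_drop_iff_isIn m s).1 ⟨j, h⟩

lemma pvFind_nonneg_of_isIn {s m : List Char} (h : PySem.Chars.isIn m s = true) :
    0 ≤ PySem.Chars.find s m :=
  (PySem.Chars.find_nonneg_iff s m).2 ((PySem.Chars.isIn_iff_infix m s).1 h)

lemma pvFind_le_of_occ {s m : List Char} {j : Nat} (h : m <+: s.drop j) :
    0 ≤ PySem.Chars.find s m ∧ (PySem.Chars.find s m).toNat ≤ j := by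
  have h0 : 0 ≤ PySem.Chars.find s m := pvFind_nonneg_of_isIn (pvIsIn_of_occ h)
  refine ⟨h0, ?_⟩
  by_contra hlt
  exact (PySem.Chars.find_spec h0).2 j (by omega) h

lemma pvFind_eq_of {m s : List Char} {c : Nat} (hocc : m <+: s.drop c)
    (hmin : ∀ j < c, ¬ m <+: s.drop j) : PySem.Chars.find s m = (c : Int) := by
  obtain ⟨h0, hle⟩ := pvFind_le_of_occ hocc
  have hocc' := (PySem.Chars.find_spec h0).1
  rcases Nat.lt_or_ge (PySem.Chars.find s m).toNat c with h | h
  · exact absurd hocc' (hmin _ h)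
  · omega

lemma pvFind_neg {m s : List Char} (h : ∀ j : Nat, ¬ m <+: s.drop j) :
    PySem.Chars.find s m = -1 := by
  rw [PySem.Chars.find_eq_neg_one_iff]
  intro hinf
  obtain ⟨j, hj⟩ := (PySem.Chars.exists_prefix_drop_iff_isIn m s).2
    ((PySem.Chars.isIn_iff_infix m s).2 hinf)
  exact h j hj

-- the three markers contain '_' only at position 0, so marker occurrences never overlap
lemma pvNoOverlap {s ma mb : List Char} (ha : ma ∈ [pvM1, pvM2, pvM3])
    (hb : mb ∈ [pvM1, pvM2, pvM3]) {j i : Nat} (hja : ma <+: s.drop j)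
    (hib : mb <+: s.drop i) (h1 : j < i) (h2 : i < j + ma.length) : False := by
  have hhb : mb[0]? = some '_' := by fin_cases hb <;> decide
  have hta : ∀ k < ma.length, 0 < k → ma[k]? ≠ some '_' := by fin_cases ha <;> decide
  obtain ⟨r, hr⟩ := hib
  obtain ⟨q, hq⟩ := hja
  have hmb0 : (0:Nat) < mb.length := by
    cases mb with
    | nil => simp at hhb
    | cons a l => simp
  have hsi : s[i]? = some '_' := by
    have hh : (s.drop i)[0]? = some '_' := by
      rw [← hr, List.getElem?_append_left hmb0, hhb]
    rwa [List.getElem?_drop, Nat.add_zero] at hh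
  have hsk : s[j + (i - j)]? = ma[i - j]? := by
    rw [← List.getElem?_drop, ← hq, List.getElem?_append_left (by omega)]
  rw [show j + (i - j) = i from by omega, hsi] at hsk
  exact hta (i - j) (by omega) (by omega) hsk.symm

lemma pvMem_cuts {s : List Char} {x : Int} :
    x ∈ pvCuts s ↔ ((x = PySem.Chars.find s pvM1 ∨ x = PySem.Chars.find s pvM2 ∨
      x = PySem.Chars.find s pvM3) ∧ 0 ≤ x) := by
  simp [pvCuts, List.mem_filter]

lemma pvMin_eq_some {s : List Char} {c : Int} (hc : c ∈ pvCuts s)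
    (hmin : ∀ x ∈ pvCuts s, c ≤ x) :
    PySem.List.min? (pvCuts s) (fun x => x) = some c := by
  cases h : PySem.List.min? (pvCuts s) (fun x => x) with
  | none =>
      rw [PySem.List.min?_eq_none_iff] at h
      rw [h] at hc
      simp at hc
  | some m =>
      have h1 := PySem.List.min?_mem h
      have h3 := PySem.List.min?_isMin h c hc
      have h4 : m = c := le_antisymm h3 (hmin m h1)
      rw [h4]

lemma pvVal_none {s : List Char} (h : PySem.List.min? (pvCuts s) (fun x => x) = none)
    (changed : Bool) :
    pvVal s changed = if changed = true ∧ s ≠ [] then some (String.ofList s) else none := by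
  unfold pvVal
  rw [h]

lemma pvVal_some {s : List Char} {c : Int}
    (h : PySem.List.min? (pvCuts s) (fun x => x) = some c) (changed : Bool) :
    pvVal s changed
      = if s.take c.toNat ≠ [] then some (String.ofList (s.take c.toNat)) else none := by
  unfold pvVal
  rw [h]

-- stripping at the first occurrence of any present marker leaves the value component unchanged
lemma pvVal_step (s mk : List Char) (hmk : mk ∈ [pvM1, pvM2, pvM3])
    (hin : PySem.Chars.isIn mk s = true) (changed : Bool) :
    pvVal (s.take (PySem.Chars.find s mk).toNat) true = pvVal s changed := by
  have hf0 : 0 ≤ PySem.Chars.find s mk := pvFind_nonneg_of_isIn hin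
  set f : Int := PySem.Chars.find s mk with hfdef
  have hoccf : mk <+: s.drop f.toNat := (PySem.Chars.find_spec hf0).1
  have hfmem : f ∈ pvCuts s := by
    rw [pvMem_cuts]
    refine ⟨?_, hf0⟩
    fin_cases hmk
    · exact Or.inl hfdef
    · exact Or.inr (Or.inl hfdef)
    · exact Or.inr (Or.inr hfdef)
  cases hm : PySem.List.min? (pvCuts s) (fun x => x) with
  | none =>
      rw [PySem.List.min?_eq_none_iff] at hm
      rw [hm] at hfmem
      simp at hfmem
  | some c =>
      have hcmem : c ∈ pvCuts s := PySem.List.min?_mem hm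
      have hcmin : ∀ x ∈ pvCuts s, c ≤ x := fun x hx => PySem.List.min?_isMin hm x hx
      have hc0 : 0 ≤ c := (pvMem_cuts.1 hcmem).2
      have hcf : c ≤ f := hcmin f hfmem
      obtain ⟨mc, hmc, hmceq⟩ : ∃ mc ∈ [pvM1, pvM2, pvM3], PySem.Chars.find s mc = c := by
        rcases (pvMem_cuts.1 hcmem).1 with h | h | h
        · exact ⟨pvM1, by simp, h.symm⟩
        · exact ⟨pvM2, by simp, h.symm⟩
        · exact ⟨pvM3, by simp, h.symm⟩
      have hoccc : mc <+: s.drop c.toNat := by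
        have := (PySem.Chars.find_spec (s := s) (sub := mc) (by omega)).1
        rwa [hmceq] at this
      have hminAll : ∀ m ∈ [pvM1, pvM2, pvM3], ∀ j : Nat, j < c.toNat → ¬ m <+: s.drop j := by
        intro m hm' j hj hocc
        obtain ⟨h0, hle⟩ := pvFind_le_of_occ hocc
        have hmem : PySem.Chars.find s m ∈ pvCuts s := by
          rw [pvMem_cuts]
          refine ⟨?_, h0⟩
          fin_cases hm'
          · exact Or.inl rfl
          · exact Or.inr (Or.inl rfl)
          · exact Or.inr (Or.inr rfl)
        have := hcmin _ hmem
        omega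
      by_cases hcf' : c = f
      · -- cut happened at the overall leftmost marker: nothing survives
        have hnone : ∀ m ∈ [pvM1, pvM2, pvM3],
            PySem.Chars.find (s.take f.toNat) m = -1 := by
          intro m hm'
          apply pvFind_neg
          intro j hocc
          have h1 := hocc.length_le
          simp only [List.length_drop, List.length_take] at h1
          have hmnil : m ≠ [] := by fin_cases hm' <;> decide
          have hmlen : 0 < m.length := List.length_pos_iff.2 hmnil
          have hjlt : j < c.toNat := by omega
          exact hminAll m hm' j hjlt (pvOcc_of_prefix (List.take_prefix _ _) hocc)
        have hcutsnil : pvCuts (s.take f.toNat) = [] := by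
          rw [pvCuts]
          rw [hnone pvM1 (by simp), hnone pvM2 (by simp), hnone pvM3 (by simp)]
          decide
        rw [pvVal_none ((PySem.List.min?_eq_none_iff _ _).2 hcutsnil) true,
            pvVal_some hm changed]
        rw [show f.toNat = c.toNat from by omega]
        simp
      · -- the leftmost marker occurrence survives the cut and stays leftmost
        have hclt : c.toNat < f.toNat := by omega
        have hsurv : c.toNat + mc.length ≤ f.toNat := by
          by_contra hh
          exact pvNoOverlap hmc hmk hoccc hoccf hclt (by omega)
        have hocct : mc <+: (s.take f.toNat).drop c.toNat := pvOcc_take hoccc hsurv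
        have hfindt : PySem.Chars.find (s.take f.toNat) mc = c := by
          have hh := pvFind_eq_of hocct (fun j hj hocc =>
            hminAll mc hmc j hj (pvOcc_of_prefix (List.take_prefix _ _) hocc))
          omega
        have hcmemt : c ∈ pvCuts (s.take f.toNat) := by
          rw [pvMem_cuts]
          refine ⟨?_, hc0⟩
          fin_cases hmc
          · exact Or.inl hfindt.symm
          · exact Or.inr (Or.inl hfindt.symm)
          · exact Or.inr (Or.inr hfindt.symm)
        have hmint : ∀ x ∈ pvCuts (s.take f.toNat), c ≤ x := by
          intro x hx
          obtain ⟨hx1, hx0⟩ := pvMem_cuts.1 hx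
          obtain ⟨m, hm', hmeq⟩ : ∃ m ∈ [pvM1, pvM2, pvM3],
              PySem.Chars.find (s.take f.toNat) m = x := by
            rcases hx1 with h | h | h
            · exact ⟨pvM1, by simp, h.symm⟩
            · exact ⟨pvM2, by simp, h.symm⟩
            · exact ⟨pvM3, by simp, h.symm⟩
          have hocc : m <+: (s.take f.toNat).drop x.toNat := by
            have := (PySem.Chars.find_spec (s := s.take f.toNat) (sub := m) (by omega)).1
            rwa [hmeq] at this
          have hoccs : m <+: s.drop x.toNat := pvOcc_of_prefix (List.take_prefix _ _) hocc
          by_contra hh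
          exact hminAll m hm' x.toNat (by omega) hoccs
        rw [pvVal_some (pvMin_eq_some hcmemt hmint) true, pvVal_some hm changed]
        rw [List.take_take]
        rw [show min c.toNat f.toNat = c.toNat from by omega]

lemma pvKind_ai (t : List Char) : pvKind t "ai_repaint" = "ai_repaint" := by
  unfold pvKind
  split_ifs <;> first | rfl | exact absurd ‹"ai_repaint" = "import"› (by decide)

lemma pvKind_step23 {s t : List Char} (ht : t <+: s)
    (hA : PySem.Chars.isIn pvM1 s = false)
    (hEC : PySem.Chars.isIn pvM2 s = true ∨ PySem.Chars.isIn pvM3 s = true)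
    (kind : String) :
    pvKind t (if kind = "import" then "crop" else kind) = pvKind s kind := by
  have hk1 : (if kind = "import" then "crop" else kind) ≠ "import" := by
    split_ifs with h
    · decide
    · exact h
  have hM1t : PySem.Chars.isIn pvM1 t = false := by
    cases h : PySem.Chars.isIn pvM1 t with
    | false => rfl
    | true =>
        exfalso
        obtain ⟨j, hj⟩ := (PySem.Chars.exists_prefix_drop_iff_isIn pvM1 t).2 h
        rw [pvIsIn_of_occ (pvOcc_of_prefix ht hj)] at hA
        simp at hA
  have hECs : (PySem.Chars.isIn pvM2 s || PySem.Chars.isIn pvM3 s) = true := by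
    rcases hEC with h | h <;> simp [h]
  unfold pvKind
  rw [hM1t, hA, hECs]
  simp only [Bool.false_eq_true, if_false, if_true]
  split_ifs with h1 <;> simp [hk1]

lemma loopA_eq (n : Nat) : ∀ (s : List Char), s.length ≤ n → ∀ (kind : String) (changed : Bool),
    loopA_py s kind changed = (pvVal s changed, pvKind s kind) := by
  induction n using Nat.strong_induction_on with
  | _ n ih =>
  intro s hs kind changed
  rw [loopA_py]
  by_cases hA : PySem.Chars.isIn pvM1 s = true
  · have hf0 : 0 ≤ PySem.Chars.find s pvM1 := pvFind_nonneg_of_isIn hA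
    have hsp : pySplit1Head s pvM1 = s.take (PySem.Chars.find s pvM1).toNat := by
      rw [pySplit1Head_eq s pvM1 (by decide), if_pos hf0]
    have hocc := (PySem.Chars.find_spec hf0).1
    have hlen := hocc.length_le
    simp only [List.length_drop] at hlen
    have hm1len : pvM1.length = 11 := by decide
    have hlt : (PySem.Chars.find s pvM1).toNat < s.length := by omega
    have hne : ¬ (pySplit1Head s pvM1 = s) := by
      rw [hsp]
      intro hh
      have h2 := congrArg List.length hh
      simp at h2
      omega
    simp only [hA, if_true]
    rw [dif_neg hne]
    rw [hsp]
    rw [ih (s.take (PySem.Chars.find s pvM1).toNat).length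
          (by simp only [List.length_take]; omega) _ le_rfl "ai_repaint" true]
    rw [pvVal_step s pvM1 (by simp) hA changed, pvKind_ai]
    unfold pvKind
    rw [hA]
    simp
  · have hA' : PySem.Chars.isIn pvM1 s = false := by
      cases h : PySem.Chars.isIn pvM1 s
      · rfl
      · exact absurd h hA
    by_cases hE : PySem.Chars.isIn pvM2 s = true
    · have hf0 : 0 ≤ PySem.Chars.find s pvM2 := pvFind_nonneg_of_isIn hE
      have hsp : pySplit1Head s pvM2 = s.take (PySem.Chars.find s pvM2).toNat := by
        rw [pySplit1Head_eq s pvM2 (by decide), if_pos hf0]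
      have hocc := (PySem.Chars.find_spec hf0).1
      have hlen := hocc.length_le
      simp only [List.length_drop] at hlen
      have hm2len : pvM2.length = 7 := by decide
      have hlt : (PySem.Chars.find s pvM2).toNat < s.length := by omega
      have hne : ¬ (pySplit1Head s pvM2 = s) := by
        rw [hsp]
        intro hh
        have h2 := congrArg List.length hh
        simp at h2
        omega
      simp only [hA', Bool.false_eq_true, if_false, hE, if_true]
      rw [dif_neg hne]
      rw [hsp]
      rw [ih (s.take (PySem.Chars.find s pvM2).toNat).length
            (by simp only [List.length_take]; omega) _ le_rfl _ true]
      rw [pvVal_step s pvM2 (by simp) hE changed]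
      rw [pvKind_step23 (List.take_prefix _ _) hA' (Or.inl hE) kind]
    · have hE' : PySem.Chars.isIn pvM2 s = false := by
        cases h : PySem.Chars.isIn pvM2 s
        · rfl
        · exact absurd h hE
      by_cases hC : PySem.Chars.isIn pvM3 s = true
      · have hf0 : 0 ≤ PySem.Chars.find s pvM3 := pvFind_nonneg_of_isIn hC
        have hsp : pySplit1Head s pvM3 = s.take (PySem.Chars.find s pvM3).toNat := by
          rw [pySplit1Head_eq s pvM3 (by decide), if_pos hf0]
        have hocc := (PySem.Chars.find_spec hf0).1
        have hlen := hocc.length_le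
        simp only [List.length_drop] at hlen
        have hm3len : pvM3.length = 5 := by decide
        have hlt : (PySem.Chars.find s pvM3).toNat < s.length := by omega
        have hne : ¬ (pySplit1Head s pvM3 = s) := by
          rw [hsp]
          intro hh
          have h2 := congrArg List.length hh
          simp at h2
          omega
        simp only [hA', hE', Bool.false_eq_true, if_false, hC, if_true]
        rw [dif_neg hne]
        rw [hsp]
        rw [ih (s.take (PySem.Chars.find s pvM3).toNat).length
              (by simp only [List.length_take]; omega) _ le_rfl _ true]
        rw [pvVal_step s pvM3 (by simp) hC changed]
        rw [pvKind_step23 (List.take_prefix _ _) hA' (Or.inr hC) kind]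
      · have hC' : PySem.Chars.isIn pvM3 s = false := by
          cases h : PySem.Chars.isIn pvM3 s
          · rfl
          · exact absurd h hC
        have hf1 : PySem.Chars.find s pvM1 = -1 := by
          rw [PySem.Chars.find_eq_neg_one_iff]
          intro h
          rw [(PySem.Chars.isIn_iff_infix pvM1 s).2 h] at hA'
          simp at hA'
        have hf2 : PySem.Chars.find s pvM2 = -1 := by
          rw [PySem.Chars.find_eq_neg_one_iff]
          intro h
          rw [(PySem.Chars.isIn_iff_infix pvM2 s).2 h] at hE'
          simp at hE'
        have hf3 : PySem.Chars.find s pvM3 = -1 := by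
          rw [PySem.Chars.find_eq_neg_one_iff]
          intro h
          rw [(PySem.Chars.isIn_iff_infix pvM3 s).2 h] at hC'
          simp at hC'
        have hcuts : pvCuts s = [] := by
          rw [pvCuts, hf1, hf2, hf3]
          decide
        have hminnone : PySem.List.min? (pvCuts s) (fun x => x) = none :=
          (PySem.List.min?_eq_none_iff _ _).2 hcuts
        simp only [hA', hE', hC', Bool.false_eq_true, if_false]
        rw [dif_pos trivial, pvVal_none hminnone changed]
        unfold pvKind
        rw [hA', hE', hC']
        simp

theorem pv_main (stem : String) :
    infer_origin_stem_py stem = infer_origin_stem_py_alt stem := by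
  simp only [infer_origin_stem_py, infer_origin_stem_py_alt, PySem.Str.find_eq]
  rw [loopA_eq stem.toList.length stem.toList le_rfl "import" false]
  rw [show List.filter (fun i => decide (0 ≤ i))
        [PySem.Chars.find stem.toList "_ai-repaint".toList,
         PySem.Chars.find stem.toList "_edited".toList,
         PySem.Chars.find stem.toList "_crop".toList] = pvCuts stem.toList from rfl]
  simp only [show PySem.Chars.find stem.toList "_ai-repaint".toList
        = PySem.Chars.find stem.toList pvM1 from rfl]
  cases hm : PySem.List.min? (pvCuts stem.toList) (fun x => x) with
  | none =>
      rw [PySem.List.min?_eq_none_iff] at hm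
      have hni : ∀ m ∈ [pvM1, pvM2, pvM3], PySem.Chars.isIn m stem.toList = false := by
        intro m hm'
        cases h : PySem.Chars.isIn m stem.toList with
        | false => rfl
        | true =>
            exfalso
            have h0 : (0:Int) ≤ PySem.Chars.find stem.toList m := pvFind_nonneg_of_isIn h
            have hcm : PySem.Chars.find stem.toList m ∈ pvCuts stem.toList := by
              rw [pvMem_cuts]
              refine ⟨?_, h0⟩
              fin_cases hm'
              · exact Or.inl rfl
              · exact Or.inr (Or.inl rfl)
              · exact Or.inr (Or.inr rfl)
            rw [hm] at hcm
            simp at hcm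
      have h1 : pvVal stem.toList false = none := by
        rw [pvVal_none ((PySem.List.min?_eq_none_iff _ _).2 hm) false]
        simp
      have h2 : pvKind stem.toList "import" = "import" := by
        unfold pvKind
        rw [hni pvM1 (by simp), hni pvM2 (by simp), hni pvM3 (by simp)]
        simp
      rw [h1, h2]
  | some c =>
      have hcmem : c ∈ pvCuts stem.toList := PySem.List.min?_mem hm
      have hc0 : 0 ≤ c := (pvMem_cuts.1 hcmem).2
      have hslice : PySem.Str.slice stem none (some c)
          = String.ofList (stem.toList.take c.toNat) := by
        rw [← String.toList_inj, PySem.Str.toList_slice, PySem.Chars.slice_eq_listSlice,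
            PySem.List.slice_to _ hc0, String.toList_ofList]
      have h1 : pvVal stem.toList false
          = (if stem.toList.take c.toNat ≠ [] then
              some (String.ofList (stem.toList.take c.toNat)) else none) :=
        pvVal_some hm false
      have h2 : pvKind stem.toList "import"
          = (if 0 ≤ PySem.Chars.find stem.toList pvM1 then "ai_repaint" else "crop") := by
        by_cases hia : 0 ≤ PySem.Chars.find stem.toList pvM1
        · have hA : PySem.Chars.isIn pvM1 stem.toList = true :=
            (PySem.Chars.isIn_iff_infix pvM1 stem.toList).2
              ((PySem.Chars.find_nonneg_iff stem.toList pvM1).1 hia)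
          unfold pvKind
          rw [hA]
          simp [hia]
        · have hA' : PySem.Chars.isIn pvM1 stem.toList = false := by
            cases h : PySem.Chars.isIn pvM1 stem.toList with
            | false => rfl
            | true => exact absurd (pvFind_nonneg_of_isIn h) hia
          have hEC : (PySem.Chars.isIn pvM2 stem.toList || PySem.Chars.isIn pvM3 stem.toList)
              = true := by
            rcases (pvMem_cuts.1 hcmem).1 with h | h | h
            · exact absurd (h ▸ hc0) hia
            · have : PySem.Chars.isIn pvM2 stem.toList = true :=
                (PySem.Chars.isIn_iff_infix pvM2 stem.toList).2
                  ((PySem.Chars.find_nonneg_iff stem.toList pvM2).1 (h ▸ hc0))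
              simp [this]
            · have : PySem.Chars.isIn pvM3 stem.toList = true :=
                (PySem.Chars.isIn_iff_infix pvM3 stem.toList).2
                  ((PySem.Chars.find_nonneg_iff stem.toList pvM3).1 (h ▸ hc0))
              simp [this]
          unfold pvKind
          rw [hA', hEC]
          simp [hia]
      rw [h1, h2]
      simp only [hslice]
      by_cases ht : stem.toList.take c.toNat = []
      · rw [ht]
        simp
      · have hne : String.ofList (stem.toList.take c.toNat) ≠ "" := by
          intro hh
          apply ht
          rw [← String.toList_ofList (l := stem.toList.take c.toNat), hh]
          rfl
        simp [ht, hne]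

-- ===== VERDICT (by name: the statement is the Claim_ definition above) =====
theorem infer_origin_stem_py_spec : Claim_equal_infer_origin_stem_py := by
  intro stem _
  unfold Spec_infer_origin_stem_py
  exact pv_main stem
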